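-- pv_equiv track=rewrite | github.com/aurechabnv/advent-of-code | 2024/day_15/day_15.py | expand_warehouse
-- ===== SOURCE A (Python) =====
-- class TILE:
--     ROBOT = '@'
--     CRATE = 'O'
--     CRATE_L = '['
--     CRATE_R = ']'
--     WALL = '#'
--     EMPTY = '.'
--     BIG_CRATE = [CRATE_L, CRATE_R]
--     CRATES = [CRATE, CRATE_L, CRATE_R]
--
-- def expand_warehouse(config):
--     expand = {
--         TILE.WALL: '##',
--         TILE.CRATE: '[]',
--         TILE.EMPTY: '..',
--         TILE.ROBOT: '@.'
--     }
--     for key in expand.keys():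
--         config = config.replace(key, expand[key])
--     return config
-- ===== SOURCE B (Python) =====
-- def expand_warehouse(config):
--     expand = {'#': '##', 'O': '[]', '.': '..', '@': '@.'}
--     return ''.join(expand.get(c, c) for c in config)
-- ===== Notes on version B (the rewrite author's own statement) =====
-- stated objective: simpler
-- what changed: Replaces four sequential whole-string replace passes with a single character-by-character pass that maps each character through the expansion table and joins the results.
import Mathlib
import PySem

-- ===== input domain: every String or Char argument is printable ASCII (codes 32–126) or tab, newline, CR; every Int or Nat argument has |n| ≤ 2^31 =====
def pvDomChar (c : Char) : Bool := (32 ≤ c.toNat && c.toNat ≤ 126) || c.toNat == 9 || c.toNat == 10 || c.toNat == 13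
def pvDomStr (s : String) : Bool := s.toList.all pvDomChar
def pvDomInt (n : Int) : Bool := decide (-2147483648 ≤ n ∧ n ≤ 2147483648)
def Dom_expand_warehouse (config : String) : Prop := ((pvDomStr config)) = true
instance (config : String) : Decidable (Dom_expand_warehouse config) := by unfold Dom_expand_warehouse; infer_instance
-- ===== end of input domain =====

-- B replaces A's four sequential whole-string replace passes with one character-by-character
-- pass through the same expansion table (objective: simpler).

-- ===== PORT A =====
-- the dict literal both versions use
def pvExpandDict : PySem.Dict String String :=
  PySem.Dict.ofList [("#", "##"), ("O", "[]"), (".", ".."), ("@", "@.")]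

-- for key in expand.keys(): config = config.replace(key, expand[key])
def expand_warehouse (config : String) : String :=
  pvExpandDict.keys.foldl (fun cfg key => PySem.Str.replace cfg key (pvExpandDict.getD key "")) config

-- ===== PORT B =====
-- return ''.join(expand.get(c, c) for c in config)
def expand_warehouse_alt (config : String) : String :=
  PySem.Str.join "" (config.toList.map (fun c => pvExpandDict.getD (String.ofList [c]) (String.ofList [c])))

-- ===== PRECONDITION & SPEC =====
def Spec_expand_warehouse (config : String) (out : String) : Prop := out = expand_warehouse_alt config
instance (config : String) (out : String) : Decidable (Spec_expand_warehouse config out) := by unfold Spec_expand_warehouse; infer_instance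

-- ===== CLAIM (what is proved, stated in full; the proofs are below) =====
def Claim_equal_expand_warehouse : Prop := ∀ (config : String), Dom_expand_warehouse config → Spec_expand_warehouse config (expand_warehouse config)

-- ===== LEMMAS AND PROOFS =====

-- per-character replacement function for a single-char needle
def pvRep (a : Char) (new : List Char) (c : Char) : List Char := if c = a then new else [c]

theorem pvGo_single (a : Char) (new : List Char) :
    ∀ (cs acc : List Char),
      PySem.Chars.replace.go [a] new cs.length cs acc = acc.reverse ++ cs.flatMap (pvRep a new) := by
  intro cs
  induction cs with
  | nil => intro acc; simp [PySem.Chars.replace.go]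
  | cons c t ih =>
    intro acc
    by_cases h : c = a
    · subst h
      simp [PySem.Chars.replace.go, List.isPrefixOf, ih, pvRep]
    · have hp : [a].isPrefixOf (c :: t) = false := by
        simp [List.isPrefixOf]
        exact fun hca => (h hca.symm).elim
      simp [PySem.Chars.replace.go, hp, ih, pvRep, h]

theorem pvReplace_single (s : String) (a : Char) (new : String) :
    PySem.Str.replace s (String.ofList [a]) new
      = String.ofList (s.toList.flatMap (pvRep a new.toList)) := by
  simp only [PySem.Str.replace, PySem.Chars.replace, String.toList_ofList]
  rw [if_neg (by simp)]
  rw [pvGo_single]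
  simp

theorem pvIntercalate_nil : ∀ (l : List (List Char)), List.intercalate [] l = l.flatten := by
  intro l
  induction l with
  | nil => rfl
  | cons x xs ih =>
    cases xs with
    | nil => simp [List.intercalate]
    | cons y ys =>
      simp only [List.intercalate, List.intersperse_cons₂, List.flatten_cons] at *
      simp [ih]

-- ===== VERDICT (by name: the statement is the Claim_ definition above) =====
theorem expand_warehouse_spec : Claim_equal_expand_warehouse := by
  intro config _
  unfold Spec_expand_warehouse expand_warehouse expand_warehouse_alt
  have hk : pvExpandDict.keys = ["#", "O", ".", "@"] := by decide
  rw [hk]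
  simp only [List.foldl]
  have h1 : ("#" : String) = String.ofList ['#'] := rfl
  have h2 : ("O" : String) = String.ofList ['O'] := rfl
  have h3 : ("." : String) = String.ofList ['.'] := rfl
  have h4 : ("@" : String) = String.ofList ['@'] := rfl
  rw [h1, h2, h3, h4]
  rw [pvReplace_single, pvReplace_single, pvReplace_single, pvReplace_single]
  simp only [String.toList_ofList, List.flatMap_assoc]
  have hB : PySem.Str.join "" (config.toList.map (fun c => pvExpandDict.getD (String.ofList [c]) (String.ofList [c])))
      = String.ofList (config.toList.flatMap (fun c => (pvExpandDict.getD (String.ofList [c]) (String.ofList [c])).toList)) := by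
    simp [PySem.Str.join, PySem.Chars.join, pvIntercalate_nil, List.flatten_eq_flatMap,
      List.flatMap_map, Function.comp]
  rw [hB]
  congr 1
  apply List.flatMap_congr
  intro c _
  by_cases hh : c = '#'
  · subst hh; decide
  by_cases ho : c = 'O'
  · subst ho; decide
  by_cases hd : c = '.'
  · subst hd; decide
  by_cases ha : c = '@'
  · subst ha; decide
  · have b1 : (("#":String) == String.ofList [c]) = false := by
      simp [beq_eq_false_iff_ne, ← String.toList_inj]; exact fun e => (hh e.symm).elim
    have b2 : (("O":String) == String.ofList [c]) = false := by
      simp [beq_eq_false_iff_ne, ← String.toList_inj]; exact fun e => (ho e.symm).elim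
    have b3 : ((".":String) == String.ofList [c]) = false := by
      simp [beq_eq_false_iff_ne, ← String.toList_inj]; exact fun e => (hd e.symm).elim
    have b4 : (("@":String) == String.ofList [c]) = false := by
      simp [beq_eq_false_iff_ne, ← String.toList_inj]; exact fun e => (ha e.symm).elim
    have hnone : pvExpandDict.get? (String.ofList [c]) = none := by
      have hmk : pvExpandDict = PySem.Dict.mk [("#", "##"), ("O", "[]"), (".", ".."), ("@", "@.")] := by decide
      rw [hmk]
      simp [b1, b2, b3, b4, PySem.Dict.get?]
    simp [pvRep, hh, ho, hd, ha, PySem.Dict.getD, hnone]
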